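-- pv_equiv track=rewrite | github.com/xARSENICx/CyberSanrakshak | packages/client/scripts/firewall_agent.py | _parse_windows_rules
-- ===== SOURCE A (Python) =====
-- def _parse_windows_rules(output):
--    """Parse Windows netsh firewall rules output."""
--    rules = []
--    lines = output.split('\n')
--    current_rule = {}
--
--    for line in lines:
--        line = line.strip()
--        if line.startswith('Rule Name:'):
--            if current_rule:
--                rules.append(current_rule)
--            current_rule = {'name': line.split(':', 1)[1].strip()}
--        elif line.startswith('Enabled:'):
--            current_rule['enabled'] = line.split(':', 1)[1].strip()
--        elif line.startswith('Direction:'):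
--            current_rule['direction'] = line.split(':', 1)[1].strip()
--        elif line.startswith('Action:'):
--            current_rule['action'] = line.split(':', 1)[1].strip()
--        elif line.startswith('Protocol:'):
--            current_rule['protocol'] = line.split(':', 1)[1].strip()
--
--    if current_rule:
--        rules.append(current_rule)
--
--    return rules
-- ===== SOURCE B (Python) =====
-- _FIELDS = [('enabled', 'Enabled:'), ('direction', 'Direction:'),
--            ('action', 'Action:'), ('protocol', 'Protocol:')]
--
--
-- def _set_field(d, ln):
--     for key, pref in _FIELDS:
--         if ln.startswith(pref):
--             d[key] = ln.split(':', 1)[1].strip()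
--             return
--
--
-- def _update(d, ln):
--     if ln.startswith('Rule Name:'):
--         d['name'] = ln.split(':', 1)[1].strip()
--     else:
--         _set_field(d, ln)
--
--
-- def _parse_windows_rules(output):
--     # Pass 1: split the stripped lines into groups, a new group at each
--     # 'Rule Name:' line; the (possibly orphan) leading lines form group 0.
--     lines = [ln.strip() for ln in output.split('\n')]
--     groups = []
--     current = []
--     for ln in lines:
--         if ln.startswith('Rule Name:'):
--             groups.append(current)
--             current = [ln]
--         else:
--             current.append(ln)
--     groups.append(current)
--     # Pass 2: map each group to a rule dict; keep the non-empty ones.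
--     rules = []
--     for g in groups:
--         d = {}
--         for ln in g:
--             _update(d, ln)
--         if d:
--             rules.append(d)
--     return rules
-- ===== Notes on version B (the rewrite author's own statement) =====
-- stated objective: alternative
-- what changed: Replaces A's single interleaved loop with mutable rule state by a two-pass decomposition: first split the stripped lines into groups at each 'Rule Name:' line (with a possibly orphan leading group), then map each group to its rule dict and keep the non-empty ones.
import Mathlib
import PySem

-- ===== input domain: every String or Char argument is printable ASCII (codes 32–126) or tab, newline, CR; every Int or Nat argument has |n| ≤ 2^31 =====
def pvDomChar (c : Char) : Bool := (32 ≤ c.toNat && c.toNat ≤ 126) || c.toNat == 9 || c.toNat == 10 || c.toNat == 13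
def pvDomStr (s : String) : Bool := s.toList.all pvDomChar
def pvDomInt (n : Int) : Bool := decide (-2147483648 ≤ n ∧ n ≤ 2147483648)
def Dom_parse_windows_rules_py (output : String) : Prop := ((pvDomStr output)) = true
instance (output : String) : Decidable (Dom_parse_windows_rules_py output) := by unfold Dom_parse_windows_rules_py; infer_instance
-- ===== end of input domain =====

-- B re-decomposes A's single interleaved loop into two passes (split into 'Rule Name:'
-- groups, then map each group to its rule dict and keep the non-empty ones); same
-- values, no speed claim.

-- ===== PORT A =====
-- line.split(':', 1)[1].strip() — the index [1] always exists where it is used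
-- (the line starts with a prefix containing ':'), so .getD 1 "" cannot fire its default.
def pvFieldVal (l : String) : String :=
  PySem.Str.strip (((PySem.Str.splitMax? l ":" 1).getD []).getD 1 "")

-- A's loop body after `line = line.strip()` (l is the stripped line).
def pvBranchA (st : List (List (String × String)) × PySem.Dict String String) (l : String) :
    List (List (String × String)) × PySem.Dict String String :=
  if PySem.Str.startswith l "Rule Name:" then
    let rules := if st.2.items.isEmpty then st.1 else st.1 ++ [st.2.items]
    (rules, (PySem.Dict.empty).insert "name" (pvFieldVal l))
  else if PySem.Str.startswith l "Enabled:" then (st.1, st.2.insert "enabled" (pvFieldVal l))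
  else if PySem.Str.startswith l "Direction:" then (st.1, st.2.insert "direction" (pvFieldVal l))
  else if PySem.Str.startswith l "Action:" then (st.1, st.2.insert "action" (pvFieldVal l))
  else if PySem.Str.startswith l "Protocol:" then (st.1, st.2.insert "protocol" (pvFieldVal l))
  else st

def parse_windows_rules_py (output : String) : List (List (String × String)) :=
  let lines := (PySem.Str.split? output "\n").getD []
  let st := lines.foldl (fun st line => pvBranchA st (PySem.Str.strip line)) ([], PySem.Dict.empty)
  if st.2.items.isEmpty then st.1 else st.1 ++ [st.2.items]

-- ===== PORT B =====
def pvIsMarker (l : String) : Bool := PySem.Str.startswith l "Rule Name:"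

-- _set_field: first matching field prefix wins (the loop's `return`).
def pvSetField : List (String × String) → String → PySem.Dict String String → PySem.Dict String String
  | [], _, d => d
  | (k, p) :: rest, l, d =>
      if PySem.Str.startswith l p then d.insert k (pvFieldVal l) else pvSetField rest l d

def pvFieldTable : List (String × String) :=
  [("enabled", "Enabled:"), ("direction", "Direction:"), ("action", "Action:"), ("protocol", "Protocol:")]

-- _update
def pvUpdate (d : PySem.Dict String String) (l : String) : PySem.Dict String String :=
  if pvIsMarker l then d.insert "name" (pvFieldVal l) else pvSetField pvFieldTable l d

-- pass 1: group the lines, a new group at each marker line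
def pvGroups (lines : List String) : List (List String) :=
  let st := lines.foldl
    (fun (st : List (List String) × List String) l =>
      if pvIsMarker l then (st.1 ++ [st.2], [l]) else (st.1, st.2 ++ [l]))
    ([], [])
  st.1 ++ [st.2]

-- pass 2 body: the rule dict of one group
def pvRuleOf (g : List String) : PySem.Dict String String :=
  g.foldl pvUpdate PySem.Dict.empty

def parse_windows_rules_py_alt (output : String) : List (List (String × String)) :=
  let lines := ((PySem.Str.split? output "\n").getD []).map PySem.Str.strip
  ((pvGroups lines).map (fun g => (pvRuleOf g).items)).filter (fun d => !d.isEmpty)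

-- ===== PRECONDITION & SPEC =====
def Spec_parse_windows_rules_py (output : String) (out : List (List (String × String))) : Prop := out = parse_windows_rules_py_alt output
instance (output : String) (out : List (List (String × String))) : Decidable (Spec_parse_windows_rules_py output out) := by unfold Spec_parse_windows_rules_py; infer_instance

-- ===== CLAIM (what is proved, stated in full; the proofs are below) =====
def Claim_equal_parse_windows_rules_py : Prop := ∀ (output : String), Dom_parse_windows_rules_py output → Spec_parse_windows_rules_py output (parse_windows_rules_py output)

-- ===== LEMMAS AND PROOFS =====

-- B's grouping step
def pvGStep (st : List (List String) × List String) (l : String) : List (List String) × List String :=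
  if pvIsMarker l then (st.1 ++ [st.2], [l]) else (st.1, st.2 ++ [l])

-- the groups produced from current group g onwards
def pvG (ls : List String) (g : List String) : List (List String) :=
  (ls.foldl pvGStep ([], g)).1 ++ [(ls.foldl pvGStep ([], g)).2]

-- emitted rules of a list of groups
def pvEmit (gs : List (List String)) : List (List (String × String)) :=
  (gs.map (fun g => (pvRuleOf g).items)).filter (fun d => !d.isEmpty)

-- A's final flush
def pvFinA (st : List (List (String × String)) × PySem.Dict String String) :
    List (List (String × String)) :=
  if st.2.items.isEmpty then st.1 else st.1 ++ [st.2.items]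

lemma pvGStep_acc (ls : List String) (gs gs' : List (List String)) (g : List String) :
    ls.foldl pvGStep (gs ++ gs', g) = (gs ++ (ls.foldl pvGStep (gs', g)).1, (ls.foldl pvGStep (gs', g)).2) := by
  induction ls generalizing gs' g with
  | nil => simp
  | cons l ls ih =>
      simp only [List.foldl_cons, pvGStep]
      by_cases h : pvIsMarker l = true
      · rw [if_pos h, if_pos h, show gs ++ gs' ++ [g] = gs ++ (gs' ++ [g]) by simp, ih]
      · rw [if_neg h, if_neg h]
        exact ih gs' (g ++ [l])

lemma pvG_cons (l : String) (ls : List String) (g : List String) :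
    pvG (l :: ls) g = if pvIsMarker l then [g] ++ pvG ls [l] else pvG ls (g ++ [l]) := by
  by_cases h : pvIsMarker l = true
  · rw [if_pos h]
    simp only [pvG, List.foldl_cons]
    rw [show pvGStep ([], g) l = ([g], [l]) by simp [pvGStep, h]]
    have hacc := pvGStep_acc ls [g] [] [l]
    simp only [List.append_nil] at hacc
    rw [hacc]
    simp
  · simp [pvG, List.foldl_cons, pvGStep, h]

lemma pvEmit_append (gs gs' : List (List String)) :
    pvEmit (gs ++ gs') = pvEmit gs ++ pvEmit gs' := by
  simp [pvEmit]

lemma pvRuleOf_append (g : List String) (l : String) :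
    pvRuleOf (g ++ [l]) = pvUpdate (pvRuleOf g) l := by
  simp [pvRuleOf]

-- non-marker lines: A's elif chain is B's _update
lemma pvBranchA_nonmarker (st : List (List (String × String)) × PySem.Dict String String)
    (l : String) (h : pvIsMarker l = false) :
    pvBranchA st l = (st.1, pvUpdate st.2 l) := by
  simp only [pvBranchA, pvUpdate, pvIsMarker] at *
  simp only [h, Bool.false_eq_true, if_false, pvSetField, pvFieldTable]
  split_ifs <;> rfl

lemma pvBranchA_marker (st : List (List (String × String)) × PySem.Dict String String)
    (l : String) (h : pvIsMarker l = true) :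
    pvBranchA st l =
      (st.1 ++ (if st.2.items.isEmpty then [] else [st.2.items]),
       (PySem.Dict.empty).insert "name" (pvFieldVal l)) := by
  simp only [pvBranchA, pvIsMarker] at *
  simp only [h, if_pos]
  split_ifs <;> simp

lemma pvEmit_single (g : List String) :
    pvEmit [g] = if (pvRuleOf g).items.isEmpty then [] else [(pvRuleOf g).items] := by
  simp only [pvEmit, List.map_cons, List.map_nil, List.filter_cons, List.filter_nil]
  by_cases h : (pvRuleOf g).items.isEmpty
  · simp [h]
  · simp [h]

lemma pvKey (ls : List String) (rs : List (List (String × String))) (g : List String) :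
    pvFinA (ls.foldl pvBranchA (rs, pvRuleOf g)) = rs ++ pvEmit (pvG ls g) := by
  induction ls generalizing rs g with
  | nil =>
      simp only [List.foldl_nil, pvFinA, pvG, List.foldl_nil, List.nil_append, pvEmit_single]
      split_ifs <;> simp
  | cons l ls ih =>
      simp only [List.foldl_cons]
      rw [pvG_cons]
      by_cases h : pvIsMarker l = true
      · rw [pvBranchA_marker _ _ h, h, if_pos rfl]
        have hname : (PySem.Dict.empty : PySem.Dict String String).insert "name" (pvFieldVal l)
            = pvRuleOf [l] := by
          simp [pvRuleOf, pvUpdate, h]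
        rw [hname, ih, pvEmit_append, pvEmit_single, List.append_assoc]
      · rw [pvBranchA_nonmarker _ _ (by simpa using h), ← pvRuleOf_append, ih]
        simp [h]

-- ===== VERDICT (by name: the statement is the Claim_ definition above) =====
theorem parse_windows_rules_py_spec : Claim_equal_parse_windows_rules_py := by
  intro output _
  show pvFinA (((PySem.Str.split? output "\n").getD []).foldl
      (fun st line => pvBranchA st (PySem.Str.strip line)) ([], PySem.Dict.empty))
    = pvEmit (pvG (((PySem.Str.split? output "\n").getD []).map PySem.Str.strip) [])
  rw [← List.foldl_map (f := PySem.Str.strip) (g := pvBranchA)]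
  have h := pvKey (((PySem.Str.split? output "\n").getD []).map PySem.Str.strip) [] []
  rw [List.nil_append] at h
  exact h
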